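-- pv_equiv track=rewrite | github.com/todormanev956/love2late | Web/static/python/project_function.py | tokenizeponct
-- ===== SOURCE A (Python) =====
-- def remove_digit (text):
--     new_text = ''
--     for char in text:
--         if not char.isdigit():
--             new_text += char
--     if new_text == '':
--         return None
--     else:
--         return new_text
--
-- def tokenizeponct(text):
--     #renvoie une liste des groupes de mot séparé par la ponctuation du text
--
--     ponc = '.,!?'
--     if ~(text[-1] in ponc):
--         text += '.' #permet à l'algo de considérer le dernier groupe de mots
--     words_group =[]
--     pos_group=[]
--     for pos,char in enumerate(text):
--         if char not in ponc:
--             pos_group.append(pos)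
--         elif  pos_group:
--             if pos_group[0] < pos:
--                 words_group.append(text[pos_group[0]:pos])
--                 pos_group=[]
--     words_group = [remove_digit(words_group[0])] + words_group[1:]
--     words_group = [x for x in words_group if (x != [] and x != [None] and x != None)]
--
--     return words_group
-- ===== SOURCE B (Python) =====
-- # Idiomatic re-implementation: map every punctuation mark to a dot, split once, filter empties,
-- # digit-strip only the first group. Raises IndexError (like A) on empty or all-punctuation text.
-- def tokenizeponct(text):
--     translated = text.replace(',', '.').replace('!', '.').replace('?', '.')
--     groups = [g for g in translated.split('.') if g != '']
--     head = ''.join(c for c in groups[0] if not c.isdigit())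
--     return ([head] if head != '' else []) + groups[1:]
-- ===== Notes on version B (the rewrite author's own statement) =====
-- stated objective: idiomatic
-- what changed: Replaced the char-by-char position-list run scanner (slice bookkeeping plus the always-true bitwise-not membership guard before the dot append) by mapping each punctuation mark to a dot, one str.split, and a filter of empty pieces; Pre_ excludes empty or all-punctuation text, on which A raises IndexError (B raises IndexError there too).
-- outside the precondition, e.g. on tokenizeponct(''): A raises IndexError, B raises IndexError; on tokenizeponct('.,!?'): A raises IndexError, B raises IndexError
import Mathlib
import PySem

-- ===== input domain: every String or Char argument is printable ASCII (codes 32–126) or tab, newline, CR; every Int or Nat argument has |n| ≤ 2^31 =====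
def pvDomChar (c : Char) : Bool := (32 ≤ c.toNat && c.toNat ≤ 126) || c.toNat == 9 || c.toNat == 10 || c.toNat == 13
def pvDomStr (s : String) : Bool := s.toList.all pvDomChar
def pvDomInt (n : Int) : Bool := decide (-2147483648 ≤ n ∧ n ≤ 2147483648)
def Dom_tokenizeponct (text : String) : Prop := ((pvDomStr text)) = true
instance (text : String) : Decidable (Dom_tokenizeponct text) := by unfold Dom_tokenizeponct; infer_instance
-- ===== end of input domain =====

-- B replaces A's char-by-char position-list run scanner by translate-punctuation + one split +
-- filter of empty pieces (idiomatic, same cost); equality of RETURN values is proved below.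

-- ===== PORT A =====
def pvPunct : List Char := ['.', ',', '!', '?']

-- Python remove_digit: builds new_text char by char, returns None when it is empty
def removeDigitA (t : String) : Option String :=
  let newText := t.toList.foldl (fun acc c => if !(PySem.Chars.isdigit c) then acc ++ [c] else acc) ([] : List Char)
  if newText = [] then none else some (String.ofList newText)

-- the loop body of A's 'for pos,char in enumerate(text)' (state = (words_group, pos_group))
def stepA (cs : List Char) (st : List String × List Int) (pc : Int × Char) : List String × List Int :=
  if !(pvPunct.contains pc.2) then (st.1, st.2 ++ [pc.1])
  else
    match st.2 with
    | [] => st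
    | p0 :: _ =>
      if p0 < pc.1 then
        (st.1 ++ [String.ofList (PySem.List.slice cs (some p0) (some pc.1))], ([] : List Int))
      else st

def tokenizeponct (text : String) : List String :=
  -- 'if ~(text[-1] in ponc)': Python ~bool is -2 or -1, both truthy, so '.' is ALWAYS appended;
  -- text[-1] still raises IndexError on "" (the none branch, excluded by Pre_)
  match PySem.Str.pyGet? text (-1) with
  | none => []
  | some _ =>
    let cs : List Char := text.toList ++ ['.']
    let st := (PySem.List.enumerate cs 0).foldl (stepA cs) (([] : List String), ([] : List Int))
    match st.1 with
    | [] => []  -- words_group[0] raises IndexError (excluded by Pre_)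
    | w0 :: rest =>
      -- [remove_digit(words_group[0])] + words_group[1:], then the filter; on str/None elements
      -- 'x != []' and 'x != [None]' are always True, so the filter only drops None
      (removeDigitA w0 :: rest.map some).filterMap id

-- ===== PORT B =====
def tokenizeponct_alt (text : String) : List String :=
  let translated := PySem.Chars.replace (PySem.Chars.replace (PySem.Chars.replace text.toList [','] ['.']) ['!'] ['.']) ['?'] ['.']
  let groups := (PySem.Chars.splitOn translated ['.']).filter (fun g => decide (g ≠ []))
  match groups with
  | [] => []  -- groups[0] raises IndexError (excluded by Pre_)
  | g0 :: rest =>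
    let head := g0.filter (fun c => !(PySem.Chars.isdigit c))
    (if head ≠ [] then [String.ofList head] else []) ++ rest.map String.ofList

-- ===== PRECONDITION & SPEC =====
-- Pre_ excludes exactly the inputs on which Python A raises IndexError: empty text (text[-1])
-- and text consisting only of '.,!?' (words_group[0] on an empty list). B raises there too.
def Pre_tokenizeponct (text : String) : Prop :=
  (text.toList.any (fun c => !(pvPunct.contains c))) = true
instance (text : String) : Decidable (Pre_tokenizeponct text) := by unfold Pre_tokenizeponct; infer_instance
def pvWitness_tokenizeponct : String := "ab, cd1."

def Spec_tokenizeponct (text : String) (out : List String) : Prop := out = tokenizeponct_alt text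
instance (text : String) (out : List String) : Decidable (Spec_tokenizeponct text out) := by unfold Spec_tokenizeponct; infer_instance

-- ===== CLAIM (what is proved, stated in full; the proofs are below) =====
def Claim_equal_tokenizeponct : Prop := ∀ (text : String), Dom_tokenizeponct text → Pre_tokenizeponct text → Spec_tokenizeponct text (tokenizeponct text)

-- ===== LEMMAS AND PROOFS =====

def consHead (p : List Char) : List (List Char) → List (List Char)
  | [] => [p]
  | g :: gs => (p ++ g) :: gs
def splitD (d : Char) : List Char → List (List Char)
  | [] => [[]]
  | c :: cs => if c = d then [] :: splitD d cs else consHead [c] (splitD d cs)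
def splitP : List Char → List (List Char)
  | [] => [[]]
  | c :: cs => if pvPunct.contains c then [] :: splitP cs else consHead [c] (splitP cs)
def scanA : List Char → List Char → List (List Char)
  | _, [] => []
  | cur, c :: t =>
    if pvPunct.contains c then (if cur = [] then scanA [] t else cur :: scanA [] t)
    else scanA (cur ++ [c]) t

theorem consHead_ne_nil (p : List Char) (gs : List (List Char)) : consHead p gs ≠ [] := by
  cases gs <;> simp [consHead]

theorem consHead_consHead (a b : List Char) (gs : List (List Char)) :
    consHead a (consHead b gs) = consHead (a ++ b) gs := by
  cases gs <;> simp [consHead]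

theorem consHead_nil (gs : List (List Char)) (h : gs ≠ []) : consHead [] gs = gs := by
  cases gs with
  | nil => exact absurd rfl h
  | cons g gs => simp [consHead]

theorem splitD_ne_nil (d : Char) (l : List Char) : splitD d l ≠ [] := by
  cases l with
  | nil => simp [splitD]
  | cons c cs =>
    simp only [splitD]
    split
    · simp
    · exact consHead_ne_nil _ _

theorem splitP_ne_nil (l : List Char) : splitP l ≠ [] := by
  cases l with
  | nil => simp [splitP]
  | cons c cs =>
    simp only [splitP]
    split
    · simp
    · exact consHead_ne_nil _ _

theorem splitD_translate (f : Char → Char) (hf : ∀ c, f c = '.' ↔ pvPunct.contains c = true)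
    (hid : ∀ c, pvPunct.contains c = false → f c = c) (cs : List Char) :
    splitD '.' (cs.map f) = splitP cs := by
  induction cs with
  | nil => rfl
  | cons c cs ih =>
    by_cases h : pvPunct.contains c = true
    · simp only [List.map_cons, splitD, splitP, h, if_pos ((hf c).mpr h), if_pos, ih]
    · have h' : pvPunct.contains c = false := by simpa using h
      have hcd : c ≠ '.' := by intro he; subst he; simp [pvPunct] at h'
      simp only [List.map_cons, splitD, splitP, h', hid c h', ih, if_neg hcd, Bool.false_eq_true, if_false]

theorem scanA_append_dot (cs : List Char) :
    ∀ cur, scanA cur (cs ++ ['.']) = (consHead cur (splitP cs)).filter (fun g => decide (g ≠ [])) := by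
  induction cs with
  | nil =>
    intro cur
    by_cases h : cur = []
    · subst h; simp [scanA, splitP, consHead, pvPunct]
    · simp [scanA, splitP, consHead, pvPunct, h]
  | cons c cs ih =>
    intro cur
    by_cases h : pvPunct.contains c = true
    · by_cases hc : cur = []
      · subst hc
        simp only [List.cons_append, scanA, h, if_pos, splitP, ih]
        cases gs : splitP cs with
        | nil => exact absurd gs (splitP_ne_nil cs)
        | cons g t => simp [consHead]
      · simp only [List.cons_append, scanA, h, if_pos, if_neg hc, splitP, ih, consHead_nil _ (splitP_ne_nil cs)]
        cases gs : splitP cs with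
        | nil => exact absurd gs (splitP_ne_nil cs)
        | cons g t => simp [consHead, List.filter, hc]
    · have h' : pvPunct.contains c = false := by simpa using h
      simp only [List.cons_append, scanA, h', Bool.false_eq_true, if_false, splitP, ih, consHead_consHead]

theorem replace_go_single (o n : Char) :
    ∀ (l acc : List Char),
      PySem.Chars.replace.go [o] [n] l.length l acc
        = acc.reverse ++ l.map (fun c => if c = o then n else c) := by
  intro l
  induction l with
  | nil => intro acc; simp [PySem.Chars.replace.go]
  | cons c t ih =>
    intro acc
    rw [List.length_cons, PySem.Chars.replace.go]
    by_cases h : c = o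
    · subst h
      simp only [List.isPrefixOf, BEq.rfl, Bool.true_and, if_true, List.length_cons,
        List.length_nil, Nat.zero_add, List.drop_succ_cons, List.drop_zero]
      rw [ih]
      simp
    · have : ([o].isPrefixOf (c :: t)) = false := by
        simp [List.isPrefixOf]
        exact fun he => absurd he.symm h
      rw [this]
      simp only [Bool.false_eq_true, if_false]
      rw [ih]
      simp [h]

theorem replace_single (o n : Char) (l : List Char) :
    PySem.Chars.replace l [o] [n] = l.map (fun c => if c = o then n else c) := by
  rw [PySem.Chars.replace]
  simp only [List.isEmpty_cons, Bool.false_eq_true, if_false]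
  exact replace_go_single o n l []

theorem splitOn_go_single (d : Char) :
    ∀ (fuel : Nat) (l cur : List Char) (acc : List (List Char)), l.length < fuel →
      PySem.Chars.splitOn.go [d] fuel l cur acc
        = acc.reverse ++ consHead cur.reverse (splitD d l) := by
  intro fuel
  induction fuel with
  | zero => intro l cur acc h; exact absurd h (by omega)
  | succ m ih =>
    intro l cur acc h
    cases l with
    | nil =>
      rw [PySem.Chars.splitOn.go]
      simp [consHead, splitD]
      omega
    | cons c t =>
      rw [PySem.Chars.splitOn.go]
      by_cases hc : c = d
      · have hp : ([d].isPrefixOf (c :: t)) = true := by simp [List.isPrefixOf, hc]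
        rw [hp]
        simp only [if_true, List.length_cons, List.length_nil, Nat.zero_add,
          List.drop_succ_cons, List.drop_zero]
        rw [ih t [] (cur.reverse :: acc) (by simpa using Nat.lt_of_succ_lt_succ h)]
        rw [splitD, if_pos hc]
        simp only [List.reverse_nil, List.reverse_cons, List.append_assoc, List.singleton_append, consHead]
        cases gs : splitD d t with
        | nil => exact absurd gs (splitD_ne_nil d t)
        | cons g tg => simp
      · have hp : ([d].isPrefixOf (c :: t)) = false := by
          simp [List.isPrefixOf]
          exact fun he => absurd he.symm hc
        rw [hp]
        simp only [Bool.false_eq_true, if_false]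
        rw [ih t (c :: cur) acc (by simpa using Nat.lt_of_succ_lt_succ h)]
        simp only [List.reverse_cons, splitD, if_neg hc, consHead_consHead]

theorem splitOn_single (d : Char) (l : List Char) :
    PySem.Chars.splitOn l [d] = splitD d l := by
  rw [PySem.Chars.splitOn, splitOn_go_single d (l.length + 1) l [] [] (by omega)]
  simp [consHead_nil _ (splitD_ne_nil d l)]

theorem foldA_inv (cs : List Char) :
    ∀ (t : List Char) (i j : Nat) (pg : List Int) (wg : List String),
      cs.drop i = t → j ≤ i → i ≤ cs.length →
      (pg = [] ∧ j = i ∨ ∃ r, pg = ((j : Int)) :: r ∧ j < i) →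
      ((PySem.List.enumerate t (i : Int)).foldl (stepA cs) (wg, pg)).1
        = wg ++ (scanA ((cs.drop j).take (i - j)) t).map String.ofList := by
  intro t
  induction t with
  | nil =>
    intro i j pg wg hdrop hji hlen hpg
    simp [PySem.List.enumerate, scanA]
  | cons c t ih =>
    intro i j pg wg hdrop hji hlen hpg
    have hi_lt : i < cs.length := by
      have := congrArg List.length hdrop
      simp only [List.length_drop, List.length_cons] at this
      omega
    have hdrop' : cs.drop (i + 1) = t := by
      have : cs.drop (i + 1) = (cs.drop i).drop 1 := by
        rw [List.drop_drop]
      rw [this, hdrop, List.drop_succ_cons, List.drop_zero]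
    have hsplit : cs.drop j = (cs.drop j).take (i - j) ++ c :: t := by
      conv_lhs => rw [← List.take_append_drop (i - j) (cs.drop j)]
      rw [List.drop_drop]
      have : j + (i - j) = i := by omega
      rw [this, hdrop]
    have hcurlen : ((cs.drop j).take (i - j)).length = i - j := by
      rw [List.length_take, List.length_drop]
      omega
    have htake1 : (cs.drop j).take (i + 1 - j) = (cs.drop j).take (i - j) ++ [c] := by
      have h1 : i + 1 - j = (i - j) + 1 := by omega
      rw [h1]
      conv_lhs => rw [hsplit]
      rw [List.take_append, List.take_of_length_le (by omega), hcurlen]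
      have : i - j + 1 - (i - j) = 1 := by omega
      rw [this]
      simp
    rw [PySem.List.enumerate_cons, List.foldl_cons]
    have hcast : ((i : Int) + 1) = ((i + 1 : Nat) : Int) := by push_cast; ring
    by_cases hc : pvPunct.contains c = true
    · have hmem : c ∈ pvPunct := List.mem_of_elem_eq_true hc
      -- punctuation char
      rcases hpg with ⟨hpgnil, hij⟩ | ⟨r, hpgcons, hjlt⟩
      · subst hpgnil
        have hstep : stepA cs (wg, ([] : List Int)) ((i : Int), c) = (wg, []) := by
          simp [stepA, hmem]
        rw [hstep, hcast, ih (i + 1) (i + 1) [] wg hdrop' (by omega) (by omega) (Or.inl ⟨rfl, rfl⟩)]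
        have hcur0 : (cs.drop j).take (i - j) = [] := by
          rw [hij]; simp
        rw [hcur0]
        simp [scanA, hmem]
      · subst hpgcons
        have hjlt' : ((j : Int)) < (i : Int) := by exact_mod_cast hjlt
        have hstep : stepA cs (wg, (j : Int) :: r) ((i : Int), c)
            = (wg ++ [String.ofList (PySem.List.slice cs (some (j : Int)) (some (i : Int)))], ([] : List Int)) := by
          simp [stepA, hmem, hjlt']
        rw [hstep, hcast, ih (i + 1) (i + 1) [] _ hdrop' (by omega) (by omega) (Or.inl ⟨rfl, rfl⟩)]
        rw [PySem.List.slice_natCast]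
        have hcurne : (cs.drop j).take (i - j) ≠ [] := by
          intro he
          rw [he] at hcurlen
          simp at hcurlen
          omega
        have hscan : scanA ((cs.drop j).take (i - j)) (c :: t)
            = (cs.drop j).take (i - j) :: scanA [] t := by
          simp [scanA, hmem, hcurne]
        rw [hscan]
        simp
    · -- ordinary char
      have hc' : pvPunct.contains c = false := by simpa using hc
      have hmem' : c ∉ pvPunct := by simpa using hc
      have hstep : stepA cs (wg, pg) ((i : Int), c) = (wg, pg ++ [(i : Int)]) := by
        simp [stepA, hmem']
      have hpg' : (pg ++ [(i : Int)] = [] ∧ j = i + 1) ∨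
          (∃ r, pg ++ [(i : Int)] = ((j : Int)) :: r ∧ j < i + 1) := by
        rcases hpg with ⟨hpgnil, hij⟩ | ⟨r, hpgcons, hjlt⟩
        · subst hpgnil; subst hij
          exact Or.inr ⟨[], by simp, by omega⟩
        · subst hpgcons
          exact Or.inr ⟨r ++ [(i : Int)], by simp, by omega⟩
      rw [hstep, hcast, ih (i + 1) j _ wg hdrop' (by omega) (by omega) hpg']
      rw [htake1]
      have : scanA ((cs.drop j).take (i - j)) (c :: t)
          = scanA ((cs.drop j).take (i - j) ++ [c]) t := by
        simp [scanA, hmem']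
      rw [this]

theorem translate_splitP (tl : List Char) :
    splitD '.' (((tl.map (fun c => if c = ',' then '.' else c)).map
        (fun c => if c = '!' then '.' else c)).map (fun c => if c = '?' then '.' else c))
      = splitP tl := by
  rw [List.map_map, List.map_map]
  apply splitD_translate
  · intro ch
    by_cases h1 : ch = ','
    · subst h1; simp [pvPunct]
    · by_cases h2 : ch = '!'
      · subst h2; simp [pvPunct]
      · by_cases h3 : ch = '?'
        · subst h3; simp [pvPunct]
        · by_cases h4 : ch = '.'
          · subst h4; simp [pvPunct]
          · simp [Function.comp, h1, h2, h3, h4, pvPunct]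
  · intro ch hch
    simp only [pvPunct, List.contains_cons] at hch
    simp only [Function.comp]
    have h1 : ch ≠ ',' := by intro he; subst he; simp at hch
    have h2 : ch ≠ '!' := by intro he; subst he; simp at hch
    have h3 : ch ≠ '?' := by intro he; subst he; simp at hch
    simp [h1, h2, h3]

theorem pyGet_neg_one_some (l : List Char) (h : l ≠ []) :
    ∃ ch, PySem.List.pyGet? l (-1) = some ch := by
  have hlen : 1 ≤ l.length := by
    cases l with
    | nil => exact absurd rfl h
    | cons a t => simp
  refine ⟨l[l.length - 1], ?_⟩
  simp only [PySem.List.pyGet?, PySem.List.pyIdx?]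
  have h0 : ¬ ((0 : Int) ≤ -1) := by omega
  have h1 : -(l.length : Int) ≤ -1 := by omega
  rw [if_neg h0, if_pos h1]
  simp only [Option.bind_some]
  rw [List.getElem?_eq_getElem (by omega)]
  simp

-- A's remove_digit on the string built from a char run
theorem removeDigitA_ofList (g : List Char) :
    removeDigitA (String.ofList g)
      = (if g.filter (fun c => !(PySem.Chars.isdigit c)) = [] then none
         else some (String.ofList (g.filter (fun c => !(PySem.Chars.isdigit c))))) := by
  unfold removeDigitA
  rw [String.toList_ofList, PySem.List.foldl_append_if_eq_filter]
  simp

-- the two ports agree on EVERY string (A's raising inputs are outside Pre_; there both ports return [])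
theorem tokenizeponct_eq_alt (text : String) : tokenizeponct text = tokenizeponct_alt text := by
  have hB : tokenizeponct_alt text
      = (match (splitP text.toList).filter (fun g => decide (g ≠ [])) with
         | [] => []
         | g0 :: rest =>
           (if g0.filter (fun c => !(PySem.Chars.isdigit c)) ≠ []
            then [String.ofList (g0.filter (fun c => !(PySem.Chars.isdigit c)))] else [])
             ++ rest.map String.ofList) := by
    unfold tokenizeponct_alt
    simp only [replace_single, splitOn_single, translate_splitP]
  rw [hB]
  by_cases htl : text.toList = []
  · have hnone : PySem.Str.pyGet? text (-1) = none := by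
      simp [PySem.Str.pyGet?, htl, PySem.List.pyGet?, PySem.List.pyIdx?]
    unfold tokenizeponct
    rw [hnone, htl]
    simp [splitP]
  · obtain ⟨ch, hsome⟩ := pyGet_neg_one_some text.toList htl
    have hsome' : PySem.Str.pyGet? text (-1) = some ch := by
      simpa [PySem.Str.pyGet?] using hsome
    unfold tokenizeponct
    rw [hsome']
    have hfold : ((PySem.List.enumerate (text.toList ++ ['.']) ((0 : Nat) : Int)).foldl
          (stepA (text.toList ++ ['.'])) (([] : List String), ([] : List Int))).1
        = ((splitP text.toList).filter (fun g => decide (g ≠ []))).map String.ofList := by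
      rw [foldA_inv (text.toList ++ ['.']) (text.toList ++ ['.']) 0 0 [] []
            (List.drop_zero) (Nat.le_refl 0) (Nat.zero_le _) (Or.inl ⟨rfl, rfl⟩)]
      rw [Nat.sub_self, List.take_zero, scanA_append_dot, consHead_nil _ (splitP_ne_nil _)]
      simp
    simp only [Nat.cast_zero] at hfold
    simp only [hfold]
    cases hgl : (splitP text.toList).filter (fun g => decide (g ≠ [])) with
    | nil => simp
    | cons g0 rest =>
      simp only [List.map_cons, removeDigitA_ofList]
      by_cases hh : g0.filter (fun c => !(PySem.Chars.isdigit c)) = []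
      · rw [if_pos hh, if_neg (by simp [hh])]
        simp
      · rw [if_neg hh, if_pos hh]
        simp

-- ===== VERDICT (by name: the statement is the Claim_ definition above) =====
theorem tokenizeponct_spec : Claim_equal_tokenizeponct := by
  intro text _ _
  unfold Spec_tokenizeponct
  exact tokenizeponct_eq_alt text
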